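-- pv_equiv track=rewrite | github.com/pypi-data/pypi-mirror-402 | packages/palisade/palisade-0.1.3-cp312-cp312-manylinux_2_34_x86_64.whl/palisade/validators/safetensors_integrity.py | _calculate_bert_parameters
-- ===== SOURCE A (Python) =====
-- from typing import TYPE_CHECKING, Any, Dict, List, Optional, Set
--
-- def _calculate_bert_parameters(config: Dict[str, Any]) -> int:
--     """Calculate parameters for BERT-style architectures."""
--     hidden_size = config.get("hidden_size", 0)
--     vocab_size = config.get("vocab_size", 0)
--     num_layers = config.get("num_hidden_layers", 0)
--     intermediate_size = config.get("intermediate_size", 0)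
--     max_position_embeddings = config.get("max_position_embeddings", 0)
--     type_vocab_size = config.get("type_vocab_size", 2)
--
--     if not all([hidden_size, vocab_size, num_layers, intermediate_size]):
--         return 0
--
--     params = 0
--
--     # Embeddings
--     params += vocab_size * hidden_size              # word embeddings
--     params += max_position_embeddings * hidden_size # position embeddings
--     params += type_vocab_size * hidden_size         # token type embeddings
--     params += hidden_size                          # embedding layer norm
--
--     # Transformer layers
--     for _ in range(num_layers):
--         # Multi-head attention
--         params += 4 * (hidden_size * hidden_size)   # Q, K, V, O projections
--         params += hidden_size                       # attention layer norm
--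
--         # Feed forward network
--         params += hidden_size * intermediate_size   # intermediate projection
--         params += intermediate_size * hidden_size   # output projection
--         params += hidden_size                       # output layer norm
--
--     # Pooler (for classification)
--     params += hidden_size * hidden_size
--
--     return params
-- ===== SOURCE B (Python) =====
-- def _calculate_bert_parameters(config):
--     """BERT parameter count as a sum of closed-form component sizes."""
--     h = config.get("hidden_size", 0)
--     v = config.get("vocab_size", 0)
--     n = config.get("num_hidden_layers", 0)
--     f = config.get("intermediate_size", 0)
--     if h == 0 or v == 0 or n == 0 or f == 0:
--         return 0
--     p = config.get("max_position_embeddings", 0)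
--     t = config.get("type_vocab_size", 2)
--     components = [
--         v * h,          # word embeddings
--         p * h,          # position embeddings
--         t * h,          # token type embeddings
--         h,              # embedding layer norm
--         n * 4 * h * h,  # attention Q/K/V/O projections
--         n * h,          # attention layer norms
--         n * 2 * h * f,  # feed-forward projections
--         n * h,          # feed-forward layer norms
--         h * h,          # pooler
--     ]
--     return sum(components)
-- ===== Notes on version B (the rewrite author's own statement) =====
-- stated objective: simpler
-- what changed: Replaces the per-layer accumulation loop with a summed list of closed-form component sizes (each layer-dependent component multiplied by num_layers); Pre_ excludes configs whose num_hidden_layers is negative while the other required sizes are nonzero, where A's value (the loop silently running zero times) is an accident of range().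
import Mathlib
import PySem

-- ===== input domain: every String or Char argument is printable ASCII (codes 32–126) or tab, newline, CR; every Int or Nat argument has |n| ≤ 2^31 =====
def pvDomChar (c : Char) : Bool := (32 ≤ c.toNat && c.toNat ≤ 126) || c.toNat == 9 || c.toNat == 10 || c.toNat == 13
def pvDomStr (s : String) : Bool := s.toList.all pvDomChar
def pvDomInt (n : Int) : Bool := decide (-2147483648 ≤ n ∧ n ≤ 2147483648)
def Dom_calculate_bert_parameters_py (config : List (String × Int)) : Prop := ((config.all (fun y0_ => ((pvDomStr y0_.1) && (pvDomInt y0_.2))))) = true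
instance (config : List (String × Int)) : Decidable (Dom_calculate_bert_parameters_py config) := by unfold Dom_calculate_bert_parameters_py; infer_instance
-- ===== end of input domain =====

-- B sums a list of closed-form component sizes instead of accumulating in a per-layer loop (simpler).

-- ===== PORT A =====
def calculate_bert_parameters_py (config : List (String × Int)) : Int :=
  let d : PySem.Dict String Int := PySem.Dict.mk config
  let hidden_size := d.getD "hidden_size" 0
  let vocab_size := d.getD "vocab_size" 0
  let num_layers := d.getD "num_hidden_layers" 0
  let intermediate_size := d.getD "intermediate_size" 0
  let max_position_embeddings := d.getD "max_position_embeddings" 0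
  let type_vocab_size := d.getD "type_vocab_size" 2
  if ¬ (hidden_size ≠ 0 ∧ vocab_size ≠ 0 ∧ num_layers ≠ 0 ∧ intermediate_size ≠ 0) then 0
  else
    let params : Int := 0
    let params := params + vocab_size * hidden_size
    let params := params + max_position_embeddings * hidden_size
    let params := params + type_vocab_size * hidden_size
    let params := params + hidden_size
    let params := (PySem.List.pyRange 0 num_layers 1).foldl
      (fun params _ =>
        let params := params + 4 * (hidden_size * hidden_size)
        let params := params + hidden_size
        let params := params + hidden_size * intermediate_size
        let params := params + intermediate_size * hidden_size
        params + hidden_size) params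
    params + hidden_size * hidden_size

-- ===== PORT B =====
def calculate_bert_parameters_py_alt (config : List (String × Int)) : Int :=
  let g : PySem.Dict String Int := PySem.Dict.mk config
  let h := g.getD "hidden_size" 0
  let v := g.getD "vocab_size" 0
  let n := g.getD "num_hidden_layers" 0
  let f := g.getD "intermediate_size" 0
  if h = 0 ∨ v = 0 ∨ n = 0 ∨ f = 0 then 0
  else
    let p := g.getD "max_position_embeddings" 0
    let t := g.getD "type_vocab_size" 2
    ([v * h, p * h, t * h, h,
      n * 4 * h * h, n * h, n * 2 * h * f, n * h,
      h * h] : List Int).sum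

-- ===== PRECONDITION & SPEC =====
-- Pre_ excludes configs whose num_hidden_layers entry is negative while hidden_size, vocab_size and
-- intermediate_size are all nonzero: there A's per-layer loop silently runs zero times (an accident of
-- range() on a negative count), a corner no caller would specify.
def Pre_calculate_bert_parameters_py (config : List (String × Int)) : Prop :=
  ¬ ((PySem.Dict.mk config).getD "num_hidden_layers" 0 < 0 ∧
     (PySem.Dict.mk config).getD "hidden_size" 0 ≠ 0 ∧
     (PySem.Dict.mk config).getD "vocab_size" 0 ≠ 0 ∧
     (PySem.Dict.mk config).getD "intermediate_size" 0 ≠ 0)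
instance (config : List (String × Int)) : Decidable (Pre_calculate_bert_parameters_py config) := by unfold Pre_calculate_bert_parameters_py; infer_instance
def pvWitness_calculate_bert_parameters_py : (List (String × Int)) :=
  [("hidden_size", 2), ("vocab_size", 3), ("num_hidden_layers", 1), ("intermediate_size", 4)]

def Spec_calculate_bert_parameters_py (config : List (String × Int)) (out : Int) : Prop := out = calculate_bert_parameters_py_alt config
instance (config : List (String × Int)) (out : Int) : Decidable (Spec_calculate_bert_parameters_py config out) := by unfold Spec_calculate_bert_parameters_py; infer_instance

-- ===== CLAIM (what is proved, stated in full; the proofs are below) =====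
def Claim_equal_calculate_bert_parameters_py : Prop := ∀ (config : List (String × Int)), Dom_calculate_bert_parameters_py config → Pre_calculate_bert_parameters_py config → Spec_calculate_bert_parameters_py config (calculate_bert_parameters_py config)

-- ===== LEMMAS AND PROOFS =====
-- the loop body adds the same constant per-layer amount each iteration
theorem loop_eq (l : List Int) (h i init : Int) :
    l.foldl (fun p _ => p + 4 * (h * h) + h + h * i + i * h + h) init
      = init + l.length * (4 * h * h + 2 * h * i + 2 * h) := by
  induction l generalizing init with
  | nil => simp
  | cons x xs ih =>
    rw [List.foldl_cons, ih]
    simp only [List.length_cons]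
    push_cast
    ring

-- ===== VERDICT (by name: the statement is the Claim_ definition above) =====
theorem calculate_bert_parameters_py_spec : Claim_equal_calculate_bert_parameters_py := by
  intro config _ hpre
  unfold Pre_calculate_bert_parameters_py at hpre
  unfold Spec_calculate_bert_parameters_py calculate_bert_parameters_py calculate_bert_parameters_py_alt
  simp only []
  set d := PySem.Dict.mk config
  set h := d.getD "hidden_size" 0 with hh
  set v := d.getD "vocab_size" 0 with hv
  set n := d.getD "num_hidden_layers" 0 with hn
  set f := d.getD "intermediate_size" 0 with hf
  by_cases hc : h = 0 ∨ v = 0 ∨ n = 0 ∨ f = 0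
  · rw [if_pos hc, if_pos (by tauto)]
  · rw [if_neg hc, if_neg (by tauto)]
    push_neg at hc
    have hn0 : 0 ≤ n := by
      by_contra hneg
      exact hpre ⟨by omega, hc.1, hc.2.1, hc.2.2.2⟩
    rw [loop_eq, PySem.List.length_pyRange_one]
    have : ((n - 0).toNat : Int) = n := by omega
    rw [this]
    simp [List.sum_cons]
    ring
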